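-- pv_equiv track=rewrite | github.com/mckk12/Advent-Of-Code-2025 | Day-2/gift_shop2.py | add_invalid_ids
-- ===== SOURCE A (Python) =====
-- def add_invalid_ids(id_ranges):
--     s = 0
--     for start, end in id_ranges:
--         for id_num in range(start, end + 1):
--             id_str = str(id_num)
--             l = len(id_str)
--             m = l//2
--             for i in range(1, m + 1):
--                 new_str = id_str[:i] * (l//i)
--                 if new_str == id_str:
--                     s += id_num
--                     break
--     return s
-- ===== SOURCE B (Python) =====
-- def add_invalid_ids(id_ranges):
--     total = 0
--     prime_reps = {}
--     for start, end in id_ranges: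
--         for n in range(start, end + 1):
--             s = str(n)
--             l = len(s)
--             reps = prime_reps.get(l)
--             if reps is None:
--                 reps = [p for p in range(2, l + 1)
--                         if l % p == 0 and all(p % q != 0 for q in range(2, p))]
--                 prime_reps[l] = reps
--             for p in reps:
--                 if s[: l // p] * p == s:
--                     total += n
--                     break
--     return total
-- ===== Notes on version B (the rewrite author's own statement) =====
-- stated objective: alternative
-- what changed: Instead of trying every prefix length up to half the digit string, B checks only the prime repetition counts dividing the string length (a string is a repeated block iff it splits into a prime number of equal blocks), memoizing those prime counts per length in a dict.
import Mathlib
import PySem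

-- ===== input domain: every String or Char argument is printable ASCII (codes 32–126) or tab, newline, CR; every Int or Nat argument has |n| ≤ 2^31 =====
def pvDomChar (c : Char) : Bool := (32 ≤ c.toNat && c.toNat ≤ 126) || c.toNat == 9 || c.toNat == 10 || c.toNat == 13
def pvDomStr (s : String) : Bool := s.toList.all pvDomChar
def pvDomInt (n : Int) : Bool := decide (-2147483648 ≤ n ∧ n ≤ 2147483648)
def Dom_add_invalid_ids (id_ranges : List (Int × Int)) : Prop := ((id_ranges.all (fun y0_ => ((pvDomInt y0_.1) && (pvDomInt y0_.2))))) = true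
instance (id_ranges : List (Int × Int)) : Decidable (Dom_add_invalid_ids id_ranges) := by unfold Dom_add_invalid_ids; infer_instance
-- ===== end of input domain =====

-- B replaces A's scan over all prefix lengths up to half the string by checks of
-- the prime repetition counts dividing the length, memoized per length (objective: alternative).

-- ===== PORT A =====
-- inner 'for i in range(1, m+1): … if new_str == id_str: s += id_num; break'
def pvInnerA (id_num : Int) (id_str : List Char) (l : Int) (s : Int) : List Int → Int
  | [] => s
  | i :: rest =>
    let new_str := PySem.List.pyRepeat (PySem.List.slice id_str none (some i)) (PySem.Int.floordiv l i)
    if new_str == id_str then s + id_num else pvInnerA id_num id_str l s rest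

def add_invalid_ids (id_ranges : List (Int × Int)) : Int :=
  id_ranges.foldl (fun s r =>
    (PySem.List.pyRange r.1 (r.2 + 1)).foldl (fun s id_num =>
      let id_str := PySem.Int.toChars id_num
      let l : Int := (id_str.length : Int)
      let m := PySem.Int.floordiv l 2
      pvInnerA id_num id_str l s (PySem.List.pyRange 1 (m + 1))) s) 0

-- ===== PORT B =====
-- '[p for p in range(2, l+1) if l % p == 0 and all(p % q != 0 for q in range(2, p))]'
def pvPrimeReps (l : Int) : List Int :=
  (PySem.List.pyRange 2 (l + 1)).filter (fun p =>
    PySem.Int.mod l p == 0 && (PySem.List.pyRange 2 p).all (fun q => PySem.Int.mod p q != 0))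

-- inner 'for p in prime_reps[l]: … break'
def pvInnerB (n : Int) (s : List Char) (l : Int) (total : Int) : List Int → Int
  | [] => total
  | p :: rest =>
    if PySem.List.pyRepeat (PySem.List.slice s none (some (PySem.Int.floordiv l p))) p == s
    then total + n else pvInnerB n s l total rest

-- body of the 'for n in range(start, end+1)' loop; state = (total, prime_reps);
-- 'reps = prime_reps.get(l); if reps is None: …' is the match on get?
def pvStepB (st : Int × PySem.Dict Int (List Int)) (n : Int) : Int × PySem.Dict Int (List Int) :=
  let s := PySem.Int.toChars n
  let l : Int := (s.length : Int)
  match st.2.get? l with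
  | some reps => (pvInnerB n s l st.1 reps, st.2)
  | none =>
    let reps := pvPrimeReps l
    (pvInnerB n s l st.1 reps, st.2.insert l reps)

def add_invalid_ids_alt (id_ranges : List (Int × Int)) : Int :=
  (id_ranges.foldl (fun st r =>
    (PySem.List.pyRange r.1 (r.2 + 1)).foldl pvStepB st) ((0 : Int), PySem.Dict.empty)).1

-- ===== PRECONDITION & SPEC =====
def Spec_add_invalid_ids (id_ranges : List (Int × Int)) (out : Int) : Prop := out = add_invalid_ids_alt id_ranges
instance (id_ranges : List (Int × Int)) (out : Int) : Decidable (Spec_add_invalid_ids id_ranges out) := by unfold Spec_add_invalid_ids; infer_instance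

-- ===== CLAIM (what is proved, stated in full; the proofs are below) =====
def Claim_equal_add_invalid_ids : Prop := ∀ (id_ranges : List (Int × Int)), Dom_add_invalid_ids id_ranges → Spec_add_invalid_ids id_ranges (add_invalid_ids id_ranges)

-- ===== LEMMAS AND PROOFS =====

-- the per-id contribution both programs add for id n
def pvContrib (n : Int) : Int :=
  let s := PySem.Int.toChars n
  let l : Int := (s.length : Int)
  if (pvPrimeReps l).any (fun p =>
      PySem.List.pyRepeat (PySem.List.slice s none (some (PySem.Int.floordiv l p))) p == s)
  then n else 0

-- a cache is good when every stored entry is the memoized value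
def pvGood (d : PySem.Dict Int (List Int)) : Prop :=
  ∀ l v, d.get? l = some v → v = pvPrimeReps l

lemma pvInnerA_eq (id_num : Int) (id_str : List Char) (l : Int) (s : Int) (is : List Int) :
    pvInnerA id_num id_str l s is =
      if is.any (fun i => PySem.List.pyRepeat (PySem.List.slice id_str none (some i)) (PySem.Int.floordiv l i) == id_str)
      then s + id_num else s := by
  induction is with
  | nil => simp [pvInnerA]
  | cons i rest ih =>
    simp only [pvInnerA, List.any_cons, ih]
    by_cases h : PySem.List.pyRepeat (PySem.List.slice id_str none (some i)) (PySem.Int.floordiv l i) == id_str <;>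
      simp [h]

lemma pvInnerB_eq (n : Int) (s : List Char) (l : Int) (total : Int) (ps : List Int) :
    pvInnerB n s l total ps =
      if ps.any (fun p => PySem.List.pyRepeat (PySem.List.slice s none (some (PySem.Int.floordiv l p))) p == s)
      then total + n else total := by
  induction ps with
  | nil => simp [pvInnerB]
  | cons p rest ih =>
    simp only [pvInnerB, List.any_cons, ih]
    by_cases h : PySem.List.pyRepeat (PySem.List.slice s none (some (PySem.Int.floordiv l p))) p == s <;>
      simp [h]

lemma pv_flatten_replicate_flatten {α : Type} (a b : Nat) (t : List α) :
    (List.replicate a (List.replicate b t).flatten).flatten = (List.replicate (a * b) t).flatten := by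
  induction a with
  | zero => simp
  | succ a ih =>
    rw [List.replicate_succ, List.flatten_cons, ih, Nat.succ_mul, Nat.add_comm,
      List.replicate_add, List.flatten_append]

lemma pv_take_flatten_replicate {α : Type} (j k : Nat) (t : List α) (h : j ≤ k) :
    ((List.replicate k t).flatten).take (t.length * j) = (List.replicate j t).flatten := by
  induction j generalizing k with
  | zero => simp
  | succ j ih =>
    obtain ⟨k, rfl⟩ : ∃ k', k = k' + 1 := ⟨k - 1, by omega⟩
    rw [List.replicate_succ, List.replicate_succ, List.flatten_cons, List.flatten_cons,
      Nat.mul_succ, Nat.add_comm, List.take_append,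
      List.take_of_length_le (by omega), Nat.add_sub_cancel_left, ih k (by omega)]

-- the core per-string fact: some prefix length up to half works iff some prime
-- repetition count dividing the length works
lemma pv_core (s : List Char) :
    ((PySem.List.pyRange 1 (PySem.Int.floordiv (s.length : Int) 2 + 1)).any (fun i =>
        PySem.List.pyRepeat (PySem.List.slice s none (some i)) (PySem.Int.floordiv (s.length : Int) i) == s)) =
    ((pvPrimeReps (s.length : Int)).any (fun p =>
        PySem.List.pyRepeat (PySem.List.slice s none (some (PySem.Int.floordiv (s.length : Int) p))) p == s)) := by
  obtain ⟨L, hLs⟩ : ∃ n, s.length = n := ⟨_, rfl⟩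
  rw [hLs]
  have h2 : PySem.Int.floordiv (L : Int) 2 = ((L / 2 : Nat) : Int) := by
    exact_mod_cast PySem.Int.floordiv_natCast L 2
  rw [Bool.eq_iff_iff, List.any_eq_true, List.any_eq_true]
  constructor
  · rintro ⟨i, hi, hchk⟩
    rw [PySem.List.mem_pyRange_one, h2] at hi
    obtain ⟨iN, rfl⟩ : ∃ iN : Nat, i = (iN : Int) := ⟨i.toNat, by omega⟩
    have hiN1 : 1 ≤ iN := by exact_mod_cast hi.1
    have hiN2 : iN ≤ L / 2 := by omega
    have hiNL : iN ≤ L := le_trans hiN2 (Nat.div_le_self L 2)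
    rw [PySem.List.slice_to s (Int.natCast_nonneg iN), PySem.Int.floordiv_natCast] at hchk
    simp only [PySem.List.pyRepeat, Int.toNat_natCast, beq_iff_eq] at hchk
    set t := s.take iN with htdef
    have ht : t.length = iN := by rw [htdef, List.length_take, hLs]; omega
    set k := L / iN with hkdef
    have hlen : k * iN = L := by
      have := congrArg List.length hchk
      simpa [List.length_flatten, List.map_replicate, List.sum_replicate, ht, hLs] using this
    have hk2 : 2 ≤ k := by
      by_contra h
      interval_cases k <;> omega
    have hkL : k ∣ L := ⟨iN, hlen.symm⟩
    set p := k.minFac with hpdef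
    have hp : p.Prime := Nat.minFac_prime (by omega)
    have hpk : p ∣ k := Nat.minFac_dvd k
    have hpL : p ∣ L := hpk.trans hkL
    have hLpos : 0 < L := by omega
    have hpLle : p ≤ L := le_trans (Nat.minFac_le (by omega)) (Nat.le_of_dvd hLpos hkL)
    refine ⟨(p : Int), ?_, ?_⟩
    · rw [pvPrimeReps, List.mem_filter]
      constructor
      · rw [PySem.List.mem_pyRange_one]
        constructor
        · exact_mod_cast hp.two_le
        · omega
      · rw [Bool.and_eq_true]
        constructor
        · rw [beq_iff_eq, PySem.Int.mod_eq_zero_iff_dvd]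
          exact_mod_cast Int.natCast_dvd_natCast.mpr hpL
        · rw [List.all_eq_true]
          intro q hq
          rw [PySem.List.mem_pyRange_one] at hq
          obtain ⟨qN, rfl⟩ : ∃ qN : Nat, q = (qN : Int) := ⟨q.toNat, by omega⟩
          have hq2 : 2 ≤ qN := by exact_mod_cast hq.1
          have hqp : qN < p := by exact_mod_cast hq.2
          rw [bne_iff_ne]
          intro hmod
          rw [PySem.Int.mod_eq_zero_iff_dvd] at hmod
          have : qN ∣ p := by exact_mod_cast hmod
          rcases (hp.eq_one_or_self_of_dvd qN this) with h1 | h1 <;> omega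
    · -- the string check at p
      rw [PySem.Int.floordiv_natCast, PySem.List.slice_to s (Int.natCast_nonneg _)]
      simp only [PySem.List.pyRepeat, Int.toNat_natCast, beq_iff_eq]
      have hm : L / p = iN * (k / p) := by
        rw [← hlen, Nat.mul_comm k iN, Nat.mul_div_assoc iN hpk]
      have htake : s.take (L / p) = (List.replicate (k / p) t).flatten := by
        conv_lhs => rw [← hchk, hm, ← ht]
        exact pv_take_flatten_replicate _ _ _ (Nat.div_le_self k p)
      rw [htake, pv_flatten_replicate_flatten, Nat.mul_div_cancel' hpk, hchk]
  · rintro ⟨p, hpmem, hchk⟩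
    rw [pvPrimeReps, List.mem_filter, PySem.List.mem_pyRange_one, Bool.and_eq_true] at hpmem
    obtain ⟨⟨hp1, hp2⟩, hdvd, _⟩ := hpmem
    obtain ⟨pN, rfl⟩ : ∃ pN : Nat, p = (pN : Int) := ⟨p.toNat, by omega⟩
    have hpN2 : 2 ≤ pN := by exact_mod_cast hp1
    have hpNL : pN ≤ L := by omega
    rw [beq_iff_eq, PySem.Int.mod_eq_zero_iff_dvd] at hdvd
    have hpNdvd : pN ∣ L := by exact_mod_cast hdvd
    refine ⟨((L / pN : Nat) : Int), ?_, ?_⟩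
    · rw [PySem.List.mem_pyRange_one, h2]
      have h1 : 1 ≤ L / pN := (Nat.one_le_div_iff (by omega)).mpr hpNL
      have hle : L / pN ≤ L / 2 := Nat.div_le_div_left hpN2 (by omega)
      refine ⟨by exact_mod_cast h1, by omega⟩
    · rw [PySem.List.slice_to s (Int.natCast_nonneg _), PySem.Int.floordiv_natCast,
        Nat.div_div_self hpNdvd (by omega)]
      rw [PySem.Int.floordiv_natCast, PySem.List.slice_to s (Int.natCast_nonneg _)] at hchk
      exact hchk


lemma pvStepB_eq (t : Int) (d : PySem.Dict Int (List Int)) (n : Int) (hd : pvGood d) :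
    (pvStepB (t, d) n).1 = t + pvContrib n ∧ pvGood (pvStepB (t, d) n).2 := by
  unfold pvStepB pvContrib
  simp only
  split
  next reps heq =>
    have hreps : reps = pvPrimeReps (((PySem.Int.toChars n).length : Nat) : Int) := hd _ reps heq
    subst hreps
    refine ⟨?_, hd⟩
    rw [pvInnerB_eq]
    split <;> simp
  next heq =>
    refine ⟨?_, ?_⟩
    · rw [pvInnerB_eq]
      split <;> simp
    · intro l' v hget
      by_cases he : l' = (((PySem.Int.toChars n).length : Nat) : Int)
      · subst he
        rw [PySem.Dict.get?_insert_self] at hget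
        exact (Option.some_inj.mp hget).symm
      · rw [PySem.Dict.get?_insert_of_ne d _ he] at hget
        exact hd l' v hget

lemma pvFoldB_eq (ids : List Int) (t : Int) (d : PySem.Dict Int (List Int)) (hd : pvGood d) :
    (ids.foldl pvStepB (t, d)).1 = t + (ids.map pvContrib).sum ∧ pvGood (ids.foldl pvStepB (t, d)).2 := by
  induction ids generalizing t d with
  | nil => simpa using hd
  | cons n rest ih =>
    obtain ⟨h1, h2⟩ := pvStepB_eq t d n hd
    rw [List.foldl_cons, ← Prod.mk.eta (p := pvStepB (t, d) n)]
    obtain ⟨ih1, ih2⟩ := ih (pvStepB (t, d) n).1 (pvStepB (t, d) n).2 h2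
    refine ⟨?_, ih2⟩
    rw [ih1, h1, List.map_cons, List.sum_cons]
    ring

lemma pvFoldA_eq (ids : List Int) (s : Int) :
    ids.foldl (fun s id_num =>
      let id_str := PySem.Int.toChars id_num
      let l : Int := (id_str.length : Int)
      let m := PySem.Int.floordiv l 2
      pvInnerA id_num id_str l s (PySem.List.pyRange 1 (m + 1))) s = s + (ids.map pvContrib).sum := by
  induction ids generalizing s with
  | nil => simp
  | cons n rest ih =>
    rw [List.foldl_cons, List.map_cons, List.sum_cons]
    simp only
    rw [pvInnerA_eq, pv_core, ih]
    unfold pvContrib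
    simp only
    split <;> ring

lemma pvOuter (rs : List (Int × Int)) (t : Int) (d : PySem.Dict Int (List Int)) (hd : pvGood d) :
    (rs.foldl (fun st r => (PySem.List.pyRange r.1 (r.2 + 1)).foldl pvStepB st) (t, d)).1 =
      rs.foldl (fun s r =>
        (PySem.List.pyRange r.1 (r.2 + 1)).foldl (fun s id_num =>
          let id_str := PySem.Int.toChars id_num
          let l : Int := (id_str.length : Int)
          let m := PySem.Int.floordiv l 2
          pvInnerA id_num id_str l s (PySem.List.pyRange 1 (m + 1))) s) t ∧
    pvGood (rs.foldl (fun st r => (PySem.List.pyRange r.1 (r.2 + 1)).foldl pvStepB st) (t, d)).2 := by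
  induction rs generalizing t d with
  | nil => exact ⟨rfl, hd⟩
  | cons r rest ih =>
    rw [List.foldl_cons, List.foldl_cons]
    obtain ⟨h1, h2⟩ := pvFoldB_eq (PySem.List.pyRange r.1 (r.2 + 1)) t d hd
    rw [← Prod.mk.eta (p := (PySem.List.pyRange r.1 (r.2 + 1)).foldl pvStepB (t, d))]
    obtain ⟨ih1, ih2⟩ := ih ((PySem.List.pyRange r.1 (r.2 + 1)).foldl pvStepB (t, d)).1
      ((PySem.List.pyRange r.1 (r.2 + 1)).foldl pvStepB (t, d)).2 h2
    refine ⟨?_, ih2⟩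
    rw [ih1, h1, pvFoldA_eq]

-- ===== VERDICT (by name: the statement is the Claim_ definition above) =====
theorem add_invalid_ids_spec : Claim_equal_add_invalid_ids := by
  intro id_ranges _
  unfold Spec_add_invalid_ids add_invalid_ids add_invalid_ids_alt
  have hempty : pvGood (PySem.Dict.empty : PySem.Dict Int (List Int)) := by
    intro l v h
    rw [PySem.Dict.get?_empty] at h
    cases h
  exact ((pvOuter id_ranges 0 PySem.Dict.empty hempty).1).symm
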